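-- pv_equiv track=rewrite | github.com/quangtrung216/plagiarism_test | service/highlight_service.py | _highlight_words
-- ===== SOURCE A (Python) =====
-- from typing import List, Dict, Any, Tuple, Optional
--
-- def _highlight_words(
--
--     words: List[str],
--     similar_pairs: List[Tuple[int, int, float]],
--     side: str
-- ) -> str:
--     """Highlight words in a sentence based on similar pairs."""
--     if side == 'query':
--         indices_to_highlight = {pair[0] for pair in similar_pairs}
--     else:  # matched
--         indices_to_highlight = {pair[1] for pair in similar_pairs}
--
--     highlighted_words = []
--     for i, word in enumerate(words):
--         if i in indices_to_highlight:
--             highlighted_words.append(f"<mark>{word}</mark>")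
--         else:
--             highlighted_words.append(word)
--
--     return " ".join(highlighted_words)
-- ===== SOURCE B (Python) =====
-- from typing import List, Tuple
--
-- def _highlight_words(
--     words: List[str],
--     similar_pairs: List[Tuple[int, int, float]],
--     side: str
-- ) -> str:
--     """Highlight by mutating only the flagged positions of a copy of words."""
--     k = 0 if side == 'query' else 1
--     result = list(words)
--     for idx in dict.fromkeys(pair[k] for pair in similar_pairs):
--         if 0 <= idx < len(result):
--             result[idx] = f"<mark>{result[idx]}</mark>"
--     return " ".join(result)
-- ===== Notes on version B (the rewrite author's own statement) =====
-- stated objective: alternative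
-- what changed: A scans every word and tests its index against a highlight set; B copies the word list and mutates only the deduplicated flagged in-range positions in place, then joins.
import Mathlib
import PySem

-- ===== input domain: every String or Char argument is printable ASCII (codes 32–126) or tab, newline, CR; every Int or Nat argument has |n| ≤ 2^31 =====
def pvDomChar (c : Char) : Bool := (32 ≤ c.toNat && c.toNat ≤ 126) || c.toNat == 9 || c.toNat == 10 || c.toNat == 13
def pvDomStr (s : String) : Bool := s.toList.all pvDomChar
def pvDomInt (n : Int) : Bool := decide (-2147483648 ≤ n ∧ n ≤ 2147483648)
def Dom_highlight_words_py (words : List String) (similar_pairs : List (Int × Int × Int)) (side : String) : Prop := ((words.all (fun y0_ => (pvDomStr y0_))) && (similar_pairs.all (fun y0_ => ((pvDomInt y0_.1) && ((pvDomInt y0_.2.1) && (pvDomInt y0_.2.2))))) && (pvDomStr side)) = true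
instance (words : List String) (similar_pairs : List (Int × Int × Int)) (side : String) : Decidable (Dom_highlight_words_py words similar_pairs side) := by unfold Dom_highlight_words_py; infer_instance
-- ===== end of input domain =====

-- B rewrites A as an in-place patch: copy the word list, wrap each deduplicated
-- flagged in-range index, join — instead of scanning every word with a set test.

-- ===== PORT A =====
def highlight_words_py (words : List String) (similar_pairs : List (Int × Int × Int)) (side : String) : String :=
  let indices_to_highlight : PySem.Set Int :=
    if side == "query" then PySem.Set.ofList (similar_pairs.map (·.1))
    else PySem.Set.ofList (similar_pairs.map (·.2.1))
  let highlighted_words : List String :=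
    (PySem.List.enumerate words).foldl (fun acc iw =>
      if PySem.Set.contains indices_to_highlight iw.1 then
        acc ++ ["<mark>" ++ iw.2 ++ "</mark>"]
      else
        acc ++ [iw.2]) []
  PySem.Str.join " " highlighted_words

-- ===== PORT B =====
def highlight_words_py_alt (words : List String) (similar_pairs : List (Int × Int × Int)) (side : String) : String :=
  let k : Int := if side == "query" then 0 else 1
  let result : List String :=
    (PySem.List.dedup (similar_pairs.map (fun pair => if k == 0 then pair.1 else pair.2.1))).foldl
      (fun res idx =>
        if 0 ≤ idx ∧ idx < (res.length : Int) then
          PySem.List.pySetD res idx ("<mark>" ++ PySem.List.pyGetD res idx "" ++ "</mark>")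
        else res)
      words
  PySem.Str.join " " result

-- ===== PRECONDITION & SPEC =====
def Spec_highlight_words_py (words : List String) (similar_pairs : List (Int × Int × Int)) (side : String) (out : String) : Prop := out = highlight_words_py_alt words similar_pairs side
instance (words : List String) (similar_pairs : List (Int × Int × Int)) (side : String) (out : String) : Decidable (Spec_highlight_words_py words similar_pairs side out) := by unfold Spec_highlight_words_py; infer_instance

-- ===== CLAIM (what is proved, stated in full; the proofs are below) =====
def Claim_equal_highlight_words_py : Prop := ∀ (words : List String) (similar_pairs : List (Int × Int × Int)) (side : String), Dom_highlight_words_py words similar_pairs side → Spec_highlight_words_py words similar_pairs side (highlight_words_py words similar_pairs side)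


-- ===== LEMMAS AND PROOFS =====

-- B's single update step (defeq to the lambda in the port's loop)
def pvStep (res : List String) (idx : Int) : List String :=
  if 0 ≤ idx ∧ idx < (res.length : Int) then
    PySem.List.pySetD res idx ("<mark>" ++ PySem.List.pyGetD res idx "" ++ "</mark>")
  else res

theorem pvFoldB_eq (ix : List Int) (l : List String) :
    ix.foldl (fun res idx =>
        if 0 ≤ idx ∧ idx < (res.length : Int) then
          PySem.List.pySetD res idx ("<mark>" ++ PySem.List.pyGetD res idx "" ++ "</mark>")
        else res) l = ix.foldl pvStep l := rfl

theorem pvStep_length (res : List String) (idx : Int) : (pvStep res idx).length = res.length := by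
  unfold pvStep
  split
  · simp [PySem.List.length_pySetD]
  · rfl

theorem pvFoldB_length (ix : List Int) (l : List String) :
    (ix.foldl pvStep l).length = l.length := by
  induction ix generalizing l with
  | nil => rfl
  | cons i ix ih => simp [List.foldl, ih, pvStep_length]

theorem pvStep_getD (l : List String) (i : Int) (j : Nat) (hj : j < l.length) :
    (pvStep l i).getD j "" =
      if i = (j : Int) then "<mark>" ++ l.getD j "" ++ "</mark>" else l.getD j "" := by
  unfold pvStep
  split
  · rename_i h
    obtain ⟨h0, hlt⟩ := h
    rw [PySem.List.pySetD_of_nonneg _ _ h0]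
    have hget : PySem.List.pyGetD l i "" = l.getD i.toNat "" := by
      conv_lhs => rw [show i = ((i.toNat : Nat) : Int) by omega]
      rw [PySem.List.pyGetD_natCast]
    rw [hget]
    by_cases he : i = (j : Int)
    · have hij : i.toNat = j := by omega
      rw [hij, if_pos he]
      rw [List.getD_eq_getElem _ "" (by simpa using hj), List.getElem_set_self]
    · have hne : i.toNat ≠ j := by omega
      rw [if_neg he]
      rw [List.getD_eq_getElem _ "" (by simpa using hj), List.getElem_set_ne hne,
        List.getD_eq_getElem _ "" hj]
  · rename_i h
    rw [if_neg (by intro he; exact h ⟨by omega, by omega⟩)]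

theorem pvFoldB_getD (ix : List Int) (hnd : ix.Nodup) (l : List String) (j : Nat) (hj : j < l.length) :
    (ix.foldl pvStep l).getD j "" =
      if (j : Int) ∈ ix then "<mark>" ++ l.getD j "" ++ "</mark>" else l.getD j "" := by
  induction ix generalizing l with
  | nil => simp
  | cons i ix ih =>
    have hnd' : ix.Nodup := hnd.of_cons
    have hni : i ∉ ix := by simpa using (List.nodup_cons.mp hnd).1
    have hj' : j < (pvStep l i).length := by rw [pvStep_length]; exact hj
    rw [List.foldl_cons, ih hnd' (pvStep l i) hj']
    by_cases hmem : (j : Int) ∈ ix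
    · rw [if_pos hmem, if_pos (List.mem_cons.mpr (Or.inr hmem))]
      have hne : i ≠ (j : Int) := by rintro rfl; exact hni hmem
      rw [pvStep_getD l i j hj, if_neg hne]
    · rw [if_neg hmem, pvStep_getD l i j hj]
      by_cases he : i = (j : Int)
      · rw [if_pos he, if_pos (List.mem_cons.mpr (Or.inl he.symm))]
      · rw [if_neg he, if_neg (by
          intro hcon
          rcases List.mem_cons.mp hcon with h | h
          · exact he h.symm
          · exact hmem h)]

-- A's append-loop is a map over the enumeration
theorem pvFoldA_map (s : PySem.Set Int) (es : List (Int × String)) (acc : List String) :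
    es.foldl (fun acc iw =>
        if PySem.Set.contains s iw.1 then acc ++ ["<mark>" ++ iw.2 ++ "</mark>"]
        else acc ++ [iw.2]) acc
      = acc ++ es.map (fun iw =>
          if PySem.Set.contains s iw.1 then "<mark>" ++ iw.2 ++ "</mark>" else iw.2) := by
  induction es generalizing acc with
  | nil => simp
  | cons e es ih => simp only [List.foldl_cons, List.map_cons, ih]; split <;> simp

theorem pvListsEq (words : List String) (ix : List Int) (hnd : ix.Nodup) :
    (PySem.List.enumerate words).map
        (fun iw => if PySem.Set.contains (PySem.Set.ofList ix) iw.1 then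
            "<mark>" ++ iw.2 ++ "</mark>" else iw.2)
      = ix.foldl pvStep words := by
  apply List.ext_getElem
  · rw [List.length_map, PySem.List.length_enumerate, pvFoldB_length]
  · intro j h1 h2
    have hj : j < words.length := by rw [pvFoldB_length] at h2; exact h2
    rw [List.getElem_map, PySem.List.getElem_enumerate]
    rw [← List.getD_eq_getElem _ "" h2, pvFoldB_getD ix hnd words j hj]
    have hc : PySem.Set.contains (PySem.Set.ofList ix) ((0 : Int) + (j : Int))
        = decide ((j : Int) ∈ ix) := by
      simp [PySem.Set.mem_ofList]
    simp only [hc]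
    by_cases hmem : (j : Int) ∈ ix
    · rw [if_pos (by simp [hmem]), if_pos hmem]
      rw [List.getD_eq_getElem _ "" hj]
    · rw [if_neg (by simp [hmem]), if_neg hmem]
      rw [List.getD_eq_getElem _ "" hj]

theorem pvMain (words : List String) (sel : List Int) :
    PySem.Str.join " "
        ((PySem.List.enumerate words).foldl (fun acc iw =>
          if PySem.Set.contains (PySem.Set.ofList sel) iw.1 then
            acc ++ ["<mark>" ++ iw.2 ++ "</mark>"]
          else acc ++ [iw.2]) [])
      = PySem.Str.join " "
          ((PySem.List.dedup sel).foldl (fun res idx =>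
            if 0 ≤ idx ∧ idx < (res.length : Int) then
              PySem.List.pySetD res idx ("<mark>" ++ PySem.List.pyGetD res idx "" ++ "</mark>")
            else res) words) := by
  rw [PySem.List.dedup_eq_ofList, pvFoldB_eq, pvFoldA_map,
    ← pvListsEq words _ (PySem.Set.nodup_ofList _), PySem.Set.ofList_ofList]
  rfl

-- ===== VERDICT (by name: the statement is the Claim_ definition above) =====
theorem highlight_words_py_spec : Claim_equal_highlight_words_py := by
  intro words similar_pairs side _
  unfold Spec_highlight_words_py highlight_words_py highlight_words_py_alt
  by_cases hs : (side == "query") = true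
  · simp only [hs, if_true]
    have hsel : (similar_pairs.map (fun pair => if ((0 : Int) == 0) = true then pair.1 else pair.2.1))
        = similar_pairs.map (·.1) := by simp
    rw [hsel]
    exact pvMain words _
  · rw [Bool.not_eq_true] at hs
    simp only [hs, Bool.false_eq_true, if_false]
    have hsel : (similar_pairs.map (fun pair => if ((1 : Int) == 0) = true then pair.1 else pair.2.1))
        = similar_pairs.map (·.2.1) := by simp
    rw [hsel]
    exact pvMain words _
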